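-- pv_equiv track=rewrite | github.com/riteshxsharma/voice2text | app/voice2text/conversion.py | _combine_fractions
-- ===== SOURCE A (Python) =====
-- CONTROL_TOKENS = {"BLOCK_OPEN", "BLOCK_CLOSE", "\n"}
--
-- def _combine_fractions(tokens: list[str]) -> list[str]:
--     combined: list[str] = []
--     index = 0
--
--     while index < len(tokens):
--         token = tokens[index]
--         if (
--             token == "over"
--             and combined
--             and index + 1 < len(tokens)
--             and combined[-1] not in CONTROL_TOKENS
--             and tokens[index + 1] not in CONTROL_TOKENS
--         ):
--             numerator = combined.pop()
--             denominator = tokens[index + 1]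
--             combined.append(rf"\frac{{{numerator}}}{{{denominator}}}")
--             index += 2
--             continue
--         combined.append(token)
--         index += 1
--
--     return combined
-- ===== SOURCE B (Python) =====
-- CONTROL_TOKENS = {"BLOCK_OPEN", "BLOCK_CLOSE", "\n"}
--
-- def _combine_fractions(tokens):
--     combined = []
--     pending_over = False
--     for token in tokens:
--         if pending_over:
--             if token not in CONTROL_TOKENS:
--                 numerator = combined.pop()
--                 combined.append(rf"\frac{{{numerator}}}{{{token}}}")
--             else:
--                 combined.append("over")
--                 combined.append(token)
--             pending_over = False
--         elif token == "over" and combined and combined[-1] not in CONTROL_TOKENS: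
--             pending_over = True
--         else:
--             combined.append(token)
--     if pending_over:
--         combined.append("over")
--     return combined
-- ===== Notes on version B (the rewrite author's own statement) =====
-- stated objective: alternative
-- what changed: Replaced A's index-based while loop with one-token lookahead and index+=2 skipping by a single forward for-loop over the tokens that holds a boolean pending_over state and resolves each held 'over' when the next token arrives (or at end of input).
import Mathlib
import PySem

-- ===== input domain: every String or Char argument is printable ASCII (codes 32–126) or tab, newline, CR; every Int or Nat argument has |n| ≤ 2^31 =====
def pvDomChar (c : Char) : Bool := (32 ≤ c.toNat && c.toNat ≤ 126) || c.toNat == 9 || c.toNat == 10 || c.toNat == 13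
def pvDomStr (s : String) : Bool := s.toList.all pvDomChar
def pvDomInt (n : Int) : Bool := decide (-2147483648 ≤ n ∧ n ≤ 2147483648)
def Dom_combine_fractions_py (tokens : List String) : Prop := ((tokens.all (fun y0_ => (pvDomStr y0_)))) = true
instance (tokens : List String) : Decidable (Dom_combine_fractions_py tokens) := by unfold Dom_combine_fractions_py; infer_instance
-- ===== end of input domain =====

-- B replaces A's index arithmetic with one-token lookahead (index += 2) by a single
-- forward scan holding a boolean `pending_over` state (objective: alternative
-- decomposition, same cost).

def pvIsControl (s : String) : Bool := s == "BLOCK_OPEN" || s == "BLOCK_CLOSE" || s == "\n"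

def pvFrac (num den : String) : String := "\\frac{" ++ num ++ "}{" ++ den ++ "}"

-- ===== PORT A =====
-- A's while loop, accumulator kept reversed (head = Python combined[-1]);
-- `index += 2` is consuming two list elements, the lookahead tokens[index+1]
-- is the second pattern element.
def pvALoop (acc l : List String) : List String :=
  match acc, l with
  | _, [] => acc.reverse
  | num :: accT, t :: den :: rest2 =>
      if t == "over" && !(pvIsControl num) && !(pvIsControl den) then
        pvALoop (pvFrac num den :: accT) rest2
      else
        pvALoop (t :: num :: accT) (den :: rest2)
  | _, t :: rest => pvALoop (t :: acc) rest
termination_by l.length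
decreasing_by all_goals (simp; try omega)

def combine_fractions_py (tokens : List String) : List String := pvALoop [] tokens

-- ===== PORT B =====
-- B's for loop with the pending_over flag (acc reversed; pop = tail, append = cons).
def pvBLoop (acc : List String) (pending : Bool) (l : List String) : List String :=
  match l with
  | [] => if pending then ("over" :: acc).reverse else acc.reverse
  | t :: rest =>
    if pending then
      if !(pvIsControl t) then
        match acc with
        | num :: accT => pvBLoop (pvFrac num t :: accT) false rest
        | [] => pvBLoop (t :: acc) false rest  -- unreachable: pending implies acc ≠ []
      else
        pvBLoop (t :: "over" :: acc) false rest
    else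
      match acc with
      | num :: _ =>
        if t == "over" && !(pvIsControl num) then pvBLoop acc true rest
        else pvBLoop (t :: acc) false rest
      | [] => pvBLoop (t :: acc) false rest

def combine_fractions_py_alt (tokens : List String) : List String := pvBLoop [] false tokens

-- ===== PRECONDITION & SPEC =====
def Spec_combine_fractions_py (tokens : List String) (out : List String) : Prop := out = combine_fractions_py_alt tokens
instance (tokens : List String) (out : List String) : Decidable (Spec_combine_fractions_py tokens out) := by unfold Spec_combine_fractions_py; infer_instance

-- ===== CLAIM (what is proved, stated in full; the proofs are below) =====
def Claim_equal_combine_fractions_py : Prop := ∀ (tokens : List String), Dom_combine_fractions_py tokens → Spec_combine_fractions_py tokens (combine_fractions_py tokens)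

-- ===== LEMMAS AND PROOFS =====

-- equation lemmas for the well-founded pvALoop
theorem pvALoop_nil (acc : List String) : pvALoop acc [] = acc.reverse := by
  rw [pvALoop.eq_def]

theorem pvALoop_emp (t : String) (rest : List String) :
    pvALoop [] (t :: rest) = pvALoop [t] rest := by
  rw [pvALoop.eq_def]
  cases rest <;> rfl

theorem pvALoop_one (num t : String) (accT : List String) :
    pvALoop (num :: accT) [t] = pvALoop (t :: num :: accT) [] := by
  rw [pvALoop.eq_def]

theorem pvALoop_two (num t den : String) (accT rest2 : List String) :
    pvALoop (num :: accT) (t :: den :: rest2) =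
      if t == "over" && !(pvIsControl num) && !(pvIsControl den) then
        pvALoop (pvFrac num den :: accT) rest2
      else
        pvALoop (t :: num :: accT) (den :: rest2) := by
  rw [pvALoop.eq_def]

-- A's loop consumes one non-merging token
theorem pvALoop_step (acc : List String) (num t : String) (accT rest : List String)
    (hacc : acc = num :: accT)
    (h : (t == "over" && !(pvIsControl num)) = false ∨ pvIsControl t = true) :
    pvALoop acc (t :: rest) = pvALoop (t :: acc) rest := by
  subst hacc
  cases rest with
  | nil => exact pvALoop_one num t accT
  | cons d rest2 =>
    rw [pvALoop_two]
    have hcond : (t == "over" && !(pvIsControl num) && !(pvIsControl d)) = false := by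
      rcases h with h | h
      · simp [h]
      · have : t ≠ "over" := by
          intro he; subst he; simp [pvIsControl] at h
        simp [this]
    rw [hcond]
    rfl

-- Joint invariant: with the flag down B's loop tracks A's loop; with the flag up
-- (and a non-control accumulator head) B's loop equals A's loop on "over" :: l.
theorem pvLoop_key : ∀ (n : Nat) (l acc : List String), l.length ≤ n →
    (pvBLoop acc false l = pvALoop acc l) ∧
    (∀ num accT, acc = num :: accT → pvIsControl num = false →
      pvBLoop acc true l = pvALoop acc ("over" :: l)) := by
  intro n
  induction n with
  | zero =>
    intro l acc hl
    have hnil : l = [] := List.eq_nil_of_length_eq_zero (Nat.le_zero.mp hl)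
    subst hnil
    refine ⟨by simp [pvBLoop, pvALoop_nil], ?_⟩
    intro num accT hacc hnc
    subst hacc
    rw [pvALoop_one, pvALoop_nil]
    simp [pvBLoop]
  | succ n ih =>
    intro l acc hl
    cases l with
    | nil =>
      refine ⟨by simp [pvBLoop, pvALoop_nil], ?_⟩
      intro num accT hacc hnc
      subst hacc
      rw [pvALoop_one, pvALoop_nil]
      simp [pvBLoop]
    | cons t rest =>
      have hrest : rest.length ≤ n := Nat.lt_succ_iff.mp (by simpa using hl)
      constructor
      · -- flag down
        cases acc with
        | nil =>
          have hB : pvBLoop [] false (t :: rest) = pvBLoop [t] false rest := by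
            simp [pvBLoop]
          rw [hB, pvALoop_emp]
          exact (ih rest [t] hrest).1
        | cons num accT =>
          by_cases hov : t = "over"
          · subst hov
            by_cases hnc : pvIsControl num = false
            · -- B raises the flag; A's current call IS pvALoop acc ("over" :: rest)
              have hB : pvBLoop (num :: accT) false ("over" :: rest)
                  = pvBLoop (num :: accT) true rest := by
                simp [pvBLoop, hnc]
              rw [hB]
              exact (ih rest (num :: accT) hrest).2 num accT rfl hnc
            · have hc : pvIsControl num = true := by
                cases h : pvIsControl num
                · exact absurd h hnc
                · rfl
              have hB : pvBLoop (num :: accT) false ("over" :: rest)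
                  = pvBLoop ("over" :: num :: accT) false rest := by
                simp [pvBLoop, hc]
              rw [hB, pvALoop_step (num :: accT) num "over" accT rest rfl
                (Or.inl (by simp [hc]))]
              exact (ih rest ("over" :: num :: accT) hrest).1
          · have hB : pvBLoop (num :: accT) false (t :: rest)
                = pvBLoop (t :: num :: accT) false rest := by
              simp [pvBLoop, hov]
            rw [hB, pvALoop_step (num :: accT) num t accT rest rfl
              (Or.inl (by simp [hov]))]
            exact (ih rest (t :: num :: accT) hrest).1
      · -- flag up
        intro num accT hacc hnc
        subst hacc
        by_cases hct : pvIsControl t = false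
        · -- t becomes the denominator
          have hB : pvBLoop (num :: accT) true (t :: rest)
              = pvBLoop (pvFrac num t :: accT) false rest := by
            simp [pvBLoop, hct]
          have hA : pvALoop (num :: accT) ("over" :: t :: rest)
              = pvALoop (pvFrac num t :: accT) rest := by
            rw [pvALoop_two]
            simp [hnc, hct]
          rw [hB, hA]
          exact (ih rest (pvFrac num t :: accT) hrest).1
        · have hc : pvIsControl t = true := by
            cases h : pvIsControl t
            · exact absurd h hct
            · rfl
          have hB : pvBLoop (num :: accT) true (t :: rest)
              = pvBLoop (t :: "over" :: num :: accT) false rest := by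
            simp [pvBLoop, hc]
          have hA : pvALoop (num :: accT) ("over" :: t :: rest)
              = pvALoop (t :: "over" :: num :: accT) rest := by
            rw [pvALoop_two]
            have hcond : ("over" == "over" && !(pvIsControl num) && !(pvIsControl t)) = false := by
              simp [hc]
            rw [hcond]
            simp only [Bool.false_eq_true, if_false]
            exact pvALoop_step ("over" :: num :: accT) "over" t ("over" :: num :: accT).tail rest rfl (Or.inr hc)
          rw [hB, hA]
          exact (ih rest (t :: "over" :: num :: accT) hrest).1

-- ===== VERDICT (by name: the statement is the Claim_ definition above) =====
theorem combine_fractions_py_spec : Claim_equal_combine_fractions_py := by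
  intro tokens _
  unfold Spec_combine_fractions_py combine_fractions_py combine_fractions_py_alt
  exact ((pvLoop_key tokens.length tokens [] le_rfl).1).symm
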